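-- pv_equiv track=rewrite | github.com/sunbyte16/100-Day-Coding-Sprint | Day-24/Calculate it.py | count_expressible_numbers
-- ===== SOURCE A (Python) =====
-- def count_expressible_numbers(X, Y):
--     numbers = set()
--
--     pow2 = 1
--     while pow2 <= Y:
--         pow3 = 1
--         while pow2 * pow3 <= Y:
--             val = pow2 * pow3
--             if val >= X:
--                 numbers.add(val)
--             pow3 *= 3
--         pow2 *= 2
--
--     return len(numbers)
-- ===== SOURCE B (Python) =====
-- def count_expressible_numbers(X, Y):
--     # One pass over powers of 3 only: for each power of 3 the admissible powers
--     # of 2 form a contiguous block, counted in closed form via bit_length().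
--     # No inner loop and no set (all 2^a*3^b are pairwise distinct anyway).
--     lo = X if X > 1 else 1
--     count = 0
--     t = 1
--     while t <= Y:
--         hi2 = Y // t
--         lo2 = (lo + t - 1) // t
--         if lo2 <= hi2:
--             count += hi2.bit_length() - (lo2 - 1).bit_length()
--         t *= 3
--     return count
-- ===== Notes on version B (the rewrite author's own statement) =====
-- stated objective: alternative
-- what changed: A's nested loops over all (2^a, 3^b) pairs feeding a dedup set are replaced by a single pass over powers of 3 in which the whole block of admissible powers of 2 is counted in closed form with bit_length on the quotient interval bounds; no inner loop and no set.
import Mathlib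
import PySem

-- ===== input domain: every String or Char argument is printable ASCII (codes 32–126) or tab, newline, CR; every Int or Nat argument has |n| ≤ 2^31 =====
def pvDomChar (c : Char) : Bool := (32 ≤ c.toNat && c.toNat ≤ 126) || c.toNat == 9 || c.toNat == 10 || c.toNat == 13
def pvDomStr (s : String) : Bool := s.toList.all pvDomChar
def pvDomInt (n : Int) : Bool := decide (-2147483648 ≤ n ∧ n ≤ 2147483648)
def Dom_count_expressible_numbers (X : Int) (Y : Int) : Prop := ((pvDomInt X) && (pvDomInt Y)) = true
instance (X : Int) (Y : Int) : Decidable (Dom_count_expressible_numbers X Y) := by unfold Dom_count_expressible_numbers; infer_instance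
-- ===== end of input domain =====

-- B replaces A's nested loops over a set by a single pass over powers of 3 in which the
-- admissible powers of 2 are counted in closed form via bit_length (no inner loop, no set).

-- ===== PORT A =====
-- inner 'while pow2 * pow3 <= Y' loop; the proof arguments 1 ≤ pow2 / 1 ≤ pow3 are loop
-- invariants of the Python code, carried only for termination.
def pvAInner (X Y pow2 pow3 : Int) (h2 : 1 ≤ pow2) (h3 : 1 ≤ pow3) (s : PySem.Set Int) :
    PySem.Set Int :=
  if h : pow2 * pow3 ≤ Y then
    pvAInner X Y pow2 (pow3 * 3) h2 (by omega)
      (if pow2 * pow3 ≥ X then PySem.Set.add s (pow2 * pow3) else s)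
  else s
termination_by (Y + 1 - pow2 * pow3).toNat
decreasing_by
  have hp : 0 < pow2 * pow3 := mul_pos (by omega) (by omega)
  have he : pow2 * (pow3 * 3) = 3 * (pow2 * pow3) := by ring
  omega

-- outer 'while pow2 <= Y' loop
def pvAOuter (X Y pow2 : Int) (h2 : 1 ≤ pow2) (s : PySem.Set Int) : PySem.Set Int :=
  if h : pow2 ≤ Y then
    pvAOuter X Y (pow2 * 2) (by omega) (pvAInner X Y pow2 1 h2 (by omega) s)
  else s
termination_by (Y + 1 - pow2).toNat
decreasing_by omega

def count_expressible_numbers (X : Int) (Y : Int) : Int :=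
  PySem.Set.len (pvAOuter X Y 1 (by omega) PySem.Set.empty)

-- ===== PORT B =====
-- 'while t <= Y: hi2 = Y//t; lo2 = (lo+t-1)//t; if lo2 <= hi2: count += hi2.bit_length() - (lo2-1).bit_length(); t *= 3'
-- PySem.Int.bitLength is n.bit_length(); 1 ≤ t is the loop invariant carried for termination.
def pvBLoop (Y lo t : Int) (ht : 1 ≤ t) : Int :=
  if h : t ≤ Y then
    (if PySem.Int.floordiv (lo + t - 1) t ≤ PySem.Int.floordiv Y t then
        (PySem.Int.bitLength (PySem.Int.floordiv Y t) : Int)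
          - (PySem.Int.bitLength (PySem.Int.floordiv (lo + t - 1) t - 1) : Int)
      else 0)
    + pvBLoop Y lo (t * 3) (by omega)
  else 0
termination_by (Y + 1 - t).toNat
decreasing_by omega

def count_expressible_numbers_alt (X : Int) (Y : Int) : Int :=
  pvBLoop Y (if X > 1 then X else 1) 1 (by omega)

-- ===== PRECONDITION & SPEC =====
def Spec_count_expressible_numbers (X : Int) (Y : Int) (out : Int) : Prop := out = count_expressible_numbers_alt X Y
instance (X : Int) (Y : Int) (out : Int) : Decidable (Spec_count_expressible_numbers X Y out) := by unfold Spec_count_expressible_numbers; infer_instance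

-- ===== CLAIM (what is proved, stated in full; the proofs are below) =====
def Claim_equal_count_expressible_numbers : Prop := ∀ (X : Int) (Y : Int), Dom_count_expressible_numbers X Y → Spec_count_expressible_numbers X Y (count_expressible_numbers X Y)

-- ===== LEMMAS AND PROOFS =====

theorem pvOneLe2 (a : ℕ) : (1 : Int) ≤ 2 ^ a := one_le_pow₀ (by norm_num)
theorem pvOneLe3 (b : ℕ) : (1 : Int) ≤ 3 ^ b := one_le_pow₀ (by norm_num)

-- the common reference quantity: indicator of X ≤ 2^a·3^b ≤ Y
def pvInd (X Y : Int) (a b : ℕ) : Int :=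
  if X ≤ 2 ^ a * 3 ^ b ∧ 2 ^ a * 3 ^ b ≤ Y then 1 else 0

-- the list of values t, 3t, 9t, … with pow2 * value ≤ Y (A's inner loop visits exactly these)
def pvInner3 (Y pow2 t : Int) (h2 : 1 ≤ pow2) (ht : 1 ≤ t) : List Int :=
  if h : pow2 * t ≤ Y then t :: pvInner3 Y pow2 (t * 3) h2 (by omega) else []
termination_by (Y + 1 - pow2 * t).toNat
decreasing_by
  have hp : 0 < pow2 * t := mul_pos (by omega) (by omega)
  have he : pow2 * (t * 3) = 3 * (pow2 * t) := by ring
  omega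

theorem pvInner3_mem (Y pow2 t : Int) (h2 : 1 ≤ pow2) (ht : 1 ≤ t) :
    ∀ u ∈ pvInner3 Y pow2 t h2 ht, t ≤ u ∧ ∃ m : ℕ, u = t * 3 ^ m := by
  fun_induction pvInner3 with
  | case1 t ht h ih =>
    intro u hu
    rcases List.mem_cons.1 hu with rfl | hu
    · exact ⟨le_refl _, 0, by ring⟩
    · obtain ⟨hle, m, rfl⟩ := ih u hu
      refine ⟨by omega, m + 1, by ring⟩
  | case2 => intro u hu; cases hu

theorem pvSet_add_len_of_not_mem (s : PySem.Set Int) (x : Int) (hx : x ∉ s) :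
    (PySem.Set.add s x).length = s.length + 1 := by
  simp [PySem.Set.add, hx]

theorem pvSet_add_mem (s : PySem.Set Int) (x v : Int) :
    v ∈ PySem.Set.add s x ↔ v ∈ s ∨ v = x := by
  simp only [PySem.Set.add]
  split_ifs with h
  · have h' : x ∈ s := by simpa using h
    constructor
    · exact Or.inl
    · rintro (hv | rfl) <;> [exact hv; exact h']
  · simp [List.mem_append]

-- A's inner loop adds |filter| fresh elements when none of its values is already present
theorem pvAInner_len (X Y pow2 t : Int) (h2 : 1 ≤ pow2) (ht : 1 ≤ t) (s : PySem.Set Int) :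
    (∀ u ∈ pvInner3 Y pow2 t h2 ht, pow2 * u ∉ s) →
    (pvAInner X Y pow2 t h2 ht s).length
      = s.length + ((pvInner3 Y pow2 t h2 ht).filter (fun u => decide (X ≤ pow2 * u))).length := by
  fun_induction pvAInner with
  | case1 t ht s h ih =>
    intro hdisj
    rw [pvInner3, dif_pos h] at hdisj ⊢
    have hhead : pow2 * t ∉ s := hdisj t (List.mem_cons_self ..)
    have htail : ∀ u ∈ pvInner3 Y pow2 (t * 3) h2 (by omega), t * 3 ≤ u :=
      fun u hu => (pvInner3_mem Y pow2 (t * 3) h2 (by omega) u hu).1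
    split_ifs at ih ⊢ with hX
    · rw [List.filter_cons_of_pos (by simpa using hX)]
      rw [ih ?_]
      · rw [pvSet_add_len_of_not_mem s _ hhead, List.length_cons]; omega
      · intro u hu
        rw [pvSet_add_mem]
        push Not
        refine ⟨hdisj u (List.mem_cons_of_mem _ hu), ?_⟩
        intro hc
        have hu3 := htail u hu
        have : u = t := mul_left_cancel₀ (by omega : pow2 ≠ 0) hc
        omega
    · rw [List.filter_cons_of_neg (by simpa using hX)]
      exact ih (fun u hu => hdisj u (List.mem_cons_of_mem _ hu))
  | case2 t ht s h =>
    intro _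
    rw [pvInner3, dif_neg h]
    simp

theorem pvAInner_mem (X Y pow2 t : Int) (h2 : 1 ≤ pow2) (ht : 1 ≤ t) (s : PySem.Set Int) :
    ∀ v ∈ pvAInner X Y pow2 t h2 ht s,
      v ∈ s ∨ ∃ u ∈ pvInner3 Y pow2 t h2 ht, v = pow2 * u := by
  fun_induction pvAInner with
  | case1 t ht s h ih =>
    intro v hv
    rw [pvInner3, dif_pos h]
    rcases ih v hv with hvs | ⟨u, hu, rfl⟩
    · split_ifs at hvs with hX
      · rcases (pvSet_add_mem s _ v).1 hvs with hvs | rfl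
        · exact Or.inl hvs
        · exact Or.inr ⟨t, List.mem_cons_self .., rfl⟩
      · exact Or.inl hvs
    · exact Or.inr ⟨u, List.mem_cons_of_mem _ hu, rfl⟩
  | case2 t ht s h =>
    intro v hv
    exact Or.inl hv

-- distinct exponent pairs give distinct values
theorem pvNT (a b c d : ℕ) (hac : a < c) : (2 : Int) ^ a * 3 ^ b ≠ 2 ^ c * 3 ^ d := by
  intro h
  have h2 : (2 : Int) ^ c = 2 ^ a * 2 ^ (c - a) := by
    rw [← pow_add]; congr 1; omega
  have h3 : (3 : Int) ^ b = 2 ^ (c - a) * 3 ^ d := by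
    have hpos : (0 : Int) < 2 ^ a := by positivity
    rw [h2] at h
    exact mul_left_cancel₀ (ne_of_gt hpos)
      (by linarith [h] : (2 : Int) ^ a * 3 ^ b = 2 ^ a * (2 ^ (c - a) * 3 ^ d))
  have hdvd : (2 : Int) ∣ 3 ^ b := by
    rw [h3]
    exact Dvd.dvd.mul_right (dvd_pow_self 2 (by omega)) _
  have hodd : Odd ((3 : Int) ^ b) := (by decide : Odd (3 : Int)).pow
  rw [Int.odd_iff] at hodd
  omega

-- A's inner filter length at pow2 = 2^a, starting at 3^j, is the sum of indicators over b ∈ [j, K)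
theorem pvInner_sum (X Y : Int) (K a : ℕ) (hY3 : Y < 3 ^ K) :
    ∀ n j, n = K - j →
    ((((pvInner3 Y (2 ^ a) (3 ^ j) (pvOneLe2 a) (pvOneLe3 j)).filter
        (fun u => decide (X ≤ 2 ^ a * u))).length : Int))
      = ∑ b ∈ Finset.Ico j K, pvInd X Y a b := by
  intro n
  induction n with
  | zero =>
    intro j hj
    have h3 : (3 : Int) ^ K ≤ 3 ^ j := pow_le_pow_right₀ (by norm_num) (by omega)
    have hgt : ¬ ((2 : Int) ^ a * 3 ^ j ≤ Y) := by nlinarith [pvOneLe2 a, pvOneLe3 j]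
    rw [pvInner3, dif_neg hgt, Finset.Ico_eq_empty (by omega)]
    simp
  | succ n ih =>
    intro j hj
    by_cases h : (2 : Int) ^ a * 3 ^ j ≤ Y
    · have hjK : j < K := by
        by_contra hc
        have h3 : (3 : Int) ^ K ≤ 3 ^ j := pow_le_pow_right₀ (by norm_num) (by omega)
        nlinarith [pvOneLe2 a, pvOneLe3 j]
      rw [pvInner3, dif_pos h]
      simp only [← pow_succ]
      rw [Finset.sum_eq_sum_Ico_succ_bot hjK]
      have hrec := ih (j + 1) (by omega)
      by_cases hX : X ≤ 2 ^ a * 3 ^ j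
      · rw [List.filter_cons_of_pos (by simpa using hX), List.length_cons]
        have hind : pvInd X Y a j = 1 := by simp [pvInd, hX, h]
        rw [hind]
        push_cast
        rw [hrec]
        ring
      · rw [List.filter_cons_of_neg (by simpa using hX)]
        have hind : pvInd X Y a j = 0 := by simp [pvInd, hX]
        rw [hind, hrec]
        ring
    · rw [pvInner3, dif_neg h]
      simp only [List.filter_nil, List.length_nil, Nat.cast_zero]
      symm
      apply Finset.sum_eq_zero
      intro b hb
      have hbj : j ≤ b := (Finset.mem_Ico.1 hb).1
      have h3 : (3 : Int) ^ j ≤ 3 ^ b := pow_le_pow_right₀ (by norm_num) hbj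
      have : ¬ (2 : Int) ^ a * 3 ^ b ≤ Y := by nlinarith [pvOneLe2 a]
      simp [pvInd, this]

-- A's outer loop from pow2 = 2^i accumulates the double sum of indicators
theorem pvOuter_sum (X Y : Int) (K : ℕ) (hY2 : Y < 2 ^ K) (hY3 : Y < 3 ^ K) :
    ∀ n i (s : PySem.Set Int), n = K - i →
    (∀ v ∈ s, ∃ a' b : ℕ, a' < i ∧ v = 2 ^ a' * 3 ^ b) →
    ((pvAOuter X Y (2 ^ i) (pvOneLe2 i) s).length : Int)
      = (s.length : Int) + ∑ a ∈ Finset.Ico i K, ∑ b ∈ Finset.Ico 0 K, pvInd X Y a b := by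
  intro n
  induction n with
  | zero =>
    intro i s hi hinv
    have h2 : (2 : Int) ^ K ≤ 2 ^ i := pow_le_pow_right₀ (by norm_num) (by omega)
    rw [pvAOuter, dif_neg (by intro hc; linarith), Finset.Ico_eq_empty (by omega)]
    simp
  | succ n ih =>
    intro i s hi hinv
    by_cases h : (2 : Int) ^ i ≤ Y
    · have hiK : i < K := by
        by_contra hc
        have : (2 : Int) ^ K ≤ 2 ^ i := pow_le_pow_right₀ (by norm_num) (by omega)
        linarith
      rw [pvAOuter, dif_pos h]
      simp only [← pow_succ]
      have hdisj : ∀ u ∈ pvInner3 Y (2 ^ i) 1 (pvOneLe2 i) (by omega), 2 ^ i * u ∉ s := by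
        intro u hu hmem
        obtain ⟨-, m, hm⟩ := pvInner3_mem Y (2 ^ i) 1 (pvOneLe2 i) (by omega) u hu
        obtain ⟨a', b, hab, hv⟩ := hinv _ hmem
        exact pvNT a' b i m hab (by rw [← hv, hm]; ring)
      have hinner := pvAInner_len X Y (2 ^ i) 1 (pvOneLe2 i) (by omega) s hdisj
      have hinv' : ∀ v ∈ pvAInner X Y (2 ^ i) 1 (pvOneLe2 i) (by omega) s,
          ∃ a' b : ℕ, a' < i + 1 ∧ v = 2 ^ a' * 3 ^ b := by
        intro v hv
        rcases pvAInner_mem X Y (2 ^ i) 1 (pvOneLe2 i) (by omega) s v hv with hvs | ⟨u, hu, rfl⟩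
        · obtain ⟨a', b, hab, hv'⟩ := hinv v hvs
          exact ⟨a', b, by omega, hv'⟩
        · obtain ⟨-, m, hm⟩ := pvInner3_mem Y (2 ^ i) 1 (pvOneLe2 i) (by omega) u hu
          exact ⟨i, m, by omega, by rw [hm]; ring⟩
      rw [ih (i + 1) _ (by omega) hinv']
      have h0 := pvInner_sum X Y K i hY3 K 0 (by omega)
      simp only [pow_zero] at h0
      rw [Finset.sum_eq_sum_Ico_succ_bot hiK, hinner]
      push_cast
      rw [h0]
      ring
    · rw [pvAOuter, dif_neg h]
      have hz : ∑ a ∈ Finset.Ico i K, ∑ b ∈ Finset.Ico 0 K, pvInd X Y a b = 0 := by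
        apply Finset.sum_eq_zero
        intro a ha
        apply Finset.sum_eq_zero
        intro b hb
        have h2 : (2 : Int) ^ i ≤ 2 ^ a := pow_le_pow_right₀ (by norm_num) (Finset.mem_Ico.1 ha).1
        have hn : ¬ (2 : Int) ^ a * 3 ^ b ≤ Y := by
          have hm : (2 : Int) ^ a * 1 ≤ 2 ^ a * 3 ^ b :=
            mul_le_mul_of_nonneg_left (pvOneLe3 b) (by positivity)
          intro hc
          linarith
        simp [pvInd, hn]
      rw [hz]
      ring

-- bit_length counts the powers of two below a bound: 2^a ≤ m ↔ a < bitLength m (m ≥ 0)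
theorem pvPow2_le_iff (m : Int) (hm : 0 ≤ m) (a : ℕ) :
    2 ^ a ≤ m ↔ a < PySem.Int.bitLength m := by
  have habs : (m.natAbs : Int) = m := Int.natAbs_of_nonneg hm
  constructor
  · intro h
    have h1 : (2 : ℕ) ^ a ≤ m.natAbs := by
      have : ((2 ^ a : ℕ) : Int) ≤ (m.natAbs : Int) := by
        push_cast
        rw [abs_of_nonneg hm]
        exact h
      exact_mod_cast this
    have h2 := PySem.Int.lt_two_pow_bitLength m
    exact (Nat.pow_lt_pow_iff_right (by norm_num)).1 (lt_of_le_of_lt h1 h2)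
  · intro h
    have hne : m ≠ 0 := by
      intro h0
      rw [h0] at h
      simp [PySem.Int.bitLength_zero] at h
    have h1 := PySem.Int.two_pow_bitLength_le m hne
    have h2 : (2 : ℕ) ^ a ≤ 2 ^ (PySem.Int.bitLength m - 1) :=
      Nat.pow_le_pow_right (by norm_num) (by omega)
    have h3 : ((2 ^ a : ℕ) : Int) ≤ (m.natAbs : Int) := by exact_mod_cast le_trans h2 h1
    rw [habs] at h3
    push_cast at h3
    exact h3

-- B's per-step closed-form term equals the indicator sum over a for fixed b = j
theorem pvBStep (X Y lo : Int) (hlo : lo = if X > 1 then X else 1) (K j : ℕ)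
    (hY2 : Y < 2 ^ K) (ht : (3 : Int) ^ j ≤ Y) :
    (if PySem.Int.floordiv (lo + 3 ^ j - 1) (3 ^ j) ≤ PySem.Int.floordiv Y (3 ^ j) then
        (PySem.Int.bitLength (PySem.Int.floordiv Y (3 ^ j)) : Int)
          - (PySem.Int.bitLength (PySem.Int.floordiv (lo + 3 ^ j - 1) (3 ^ j) - 1) : Int)
      else 0)
      = ∑ a ∈ Finset.Ico 0 K, pvInd X Y a j := by
  have ht0 : (0 : Int) < 3 ^ j := by positivity
  have hlo1 : 1 ≤ lo := by rw [hlo]; split_ifs <;> omega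
  set hi2 := PySem.Int.floordiv Y (3 ^ j) with hhi
  set lo2 := PySem.Int.floordiv (lo + 3 ^ j - 1) (3 ^ j) with hlo2d
  -- floordiv upper-bound bracket: floordiv c t ≤ q ↔ c < (q+1)*t
  have hfd : ∀ c q : Int, PySem.Int.floordiv c (3 ^ j) ≤ q ↔ c < (q + 1) * 3 ^ j := by
    intro c q
    constructor
    · intro hq
      by_contra hcon
      have h1 : (q + 1) * 3 ^ j ≤ c := by linarith
      have := (PySem.Int.le_floordiv_iff_mul_le ht0).2 h1
      omega
    · intro hq
      by_contra hcon
      have h1 : q + 1 ≤ PySem.Int.floordiv c (3 ^ j) := by omega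
      have := (PySem.Int.le_floordiv_iff_mul_le ht0).1 h1
      linarith
  have hhi_ge : 1 ≤ hi2 := by
    rw [hhi, PySem.Int.le_floordiv_iff_mul_le ht0]
    linarith
  have hlo2_ge : 1 ≤ lo2 := by
    rw [hlo2d, PySem.Int.le_floordiv_iff_mul_le ht0]
    linarith
  have hhi_le : hi2 ≤ Y := by
    rw [hhi, hfd Y Y]
    nlinarith
  have hchar : ∀ a : ℕ, pvInd X Y a j
      = if PySem.Int.bitLength (lo2 - 1) ≤ a ∧ a < PySem.Int.bitLength hi2 then (1 : Int) else 0 := by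
    intro a
    have hv1 : (1 : Int) ≤ 2 ^ a * 3 ^ j := by nlinarith [pvOneLe2 a, pvOneLe3 j]
    have hc1 : 2 ^ a * 3 ^ j ≤ Y ↔ 2 ^ a ≤ hi2 := by
      rw [hhi, PySem.Int.le_floordiv_iff_mul_le ht0]
    have hc2 : lo ≤ 2 ^ a * 3 ^ j ↔ lo2 ≤ 2 ^ a := by
      rw [hlo2d, hfd (lo + 3 ^ j - 1) (2 ^ a)]
      constructor
      · intro hx
        nlinarith
      · intro hx
        nlinarith
    have hbL := pvPow2_le_iff (lo2 - 1) (by omega) a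
    have hbH := pvPow2_le_iff hi2 (by omega) a
    have hiff : (X ≤ 2 ^ a * 3 ^ j ∧ 2 ^ a * 3 ^ j ≤ Y)
        ↔ (PySem.Int.bitLength (lo2 - 1) ≤ a ∧ a < PySem.Int.bitLength hi2) := by
      have hXv : X ≤ 2 ^ a * 3 ^ j ↔ lo ≤ 2 ^ a * 3 ^ j := by
        rw [hlo]; split_ifs with h1 <;> constructor <;> intro <;> linarith
      rw [hXv, hc2, hc1]
      constructor
      · rintro ⟨ha1, ha2⟩
        refine ⟨?_, hbH.1 ha2⟩
        by_contra hc
        have := hbL.2 (by omega)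
        linarith
      · rintro ⟨hb1, hb2⟩
        refine ⟨?_, hbH.2 hb2⟩
        by_contra hc
        have h1 : (2 : Int) ^ a ≤ lo2 - 1 := by linarith
        have := hbL.1 h1
        omega
    unfold pvInd
    simp only [hiff]
  have hsum : ∑ a ∈ Finset.Ico 0 K, pvInd X Y a j
      = ∑ a ∈ Finset.Ico 0 K,
          (if PySem.Int.bitLength (lo2 - 1) ≤ a ∧ a < PySem.Int.bitLength hi2 then (1 : Int) else 0) :=
    Finset.sum_congr rfl (fun a _ => hchar a)
  rw [hsum, Finset.sum_boole]
  have hbH_le : PySem.Int.bitLength hi2 ≤ K := by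
    by_contra hc
    have := (pvPow2_le_iff hi2 (by omega) K).2 (by omega)
    linarith
  by_cases hle : lo2 ≤ hi2
  · rw [if_pos hle]
    have hbLbH : PySem.Int.bitLength (lo2 - 1) ≤ PySem.Int.bitLength hi2 := by
      by_contra hc
      have h1 := (pvPow2_le_iff (lo2 - 1) (by omega) (PySem.Int.bitLength hi2)).2 (by omega)
      have h2 : ¬ ((2 : Int) ^ PySem.Int.bitLength hi2 ≤ hi2) := by
        intro hx
        exact lt_irrefl _ ((pvPow2_le_iff hi2 (by omega) _).1 hx)
      have h3 : hi2 < (2 : Int) ^ PySem.Int.bitLength hi2 := by linarith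
      linarith
    have hfe : Finset.filter
        (fun a => PySem.Int.bitLength (lo2 - 1) ≤ a ∧ a < PySem.Int.bitLength hi2)
        (Finset.Ico 0 K) = Finset.Ico (PySem.Int.bitLength (lo2 - 1)) (PySem.Int.bitLength hi2) := by
      ext x
      simp only [Finset.mem_filter, Finset.mem_Ico]
      omega
    rw [hfe, Nat.card_Ico, Nat.cast_sub hbLbH]
  · rw [if_neg hle]
    have hfe : Finset.filter
        (fun a => PySem.Int.bitLength (lo2 - 1) ≤ a ∧ a < PySem.Int.bitLength hi2)
        (Finset.Ico 0 K) = ∅ := by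
      rw [Finset.filter_eq_empty_iff]
      rintro a - ⟨h1, h2⟩
      have hl : lo2 - 1 < 2 ^ a := by
        by_contra hcc
        have := (pvPow2_le_iff (lo2 - 1) (by omega) a).1 (by linarith)
        omega
      have hh : (2 : Int) ^ a ≤ hi2 := (pvPow2_le_iff hi2 (by omega) a).2 h2
      exact hle (by linarith)
    rw [hfe]
    simp

-- B's loop from t = 3^j accumulates the transposed double sum
theorem pvBLoop_sum (X Y lo : Int) (hlo : lo = if X > 1 then X else 1) (K : ℕ)
    (hY2 : Y < 2 ^ K) (hY3 : Y < 3 ^ K) :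
    ∀ n j, n = K - j →
    pvBLoop Y lo (3 ^ j) (pvOneLe3 j)
      = ∑ b ∈ Finset.Ico j K, ∑ a ∈ Finset.Ico 0 K, pvInd X Y a b := by
  intro n
  induction n with
  | zero =>
    intro j hj
    have h3 : (3 : Int) ^ K ≤ 3 ^ j := pow_le_pow_right₀ (by norm_num) (by omega)
    rw [pvBLoop, dif_neg (by intro hc; linarith), Finset.Ico_eq_empty (by omega)]
    simp
  | succ n ih =>
    intro j hj
    by_cases h : (3 : Int) ^ j ≤ Y
    · have hjK : j < K := by
        by_contra hc
        have : (3 : Int) ^ K ≤ 3 ^ j := pow_le_pow_right₀ (by norm_num) (by omega)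
        linarith
      rw [pvBLoop, dif_pos h]
      simp only [← pow_succ]
      rw [Finset.sum_eq_sum_Ico_succ_bot hjK, ih (j + 1) (by omega),
        pvBStep X Y lo hlo K j hY2 h]
    · rw [pvBLoop, dif_neg h]
      symm
      apply Finset.sum_eq_zero
      intro b hb
      apply Finset.sum_eq_zero
      intro a ha
      have h3 : (3 : Int) ^ j ≤ 3 ^ b := pow_le_pow_right₀ (by norm_num) (Finset.mem_Ico.1 hb).1
      have hn : ¬ (2 : Int) ^ a * 3 ^ b ≤ Y := by
        have hm : (1 : Int) * 3 ^ b ≤ 2 ^ a * 3 ^ b :=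
          mul_le_mul_of_nonneg_right (pvOneLe2 a) (by positivity)
        intro hc
        linarith
      simp [pvInd, hn]

-- ===== VERDICT (by name: the statement is the Claim_ definition above) =====
theorem count_expressible_numbers_spec : Claim_equal_count_expressible_numbers := by
  intro X Y hD
  unfold Dom_count_expressible_numbers pvDomInt at hD
  simp only [Bool.and_eq_true, decide_eq_true_eq] at hD
  unfold Spec_count_expressible_numbers count_expressible_numbers count_expressible_numbers_alt
  have hY2 : Y < 2 ^ 33 := by norm_num; omega
  have hY3 : Y < 3 ^ 33 := by norm_num; omega
  have hA := pvOuter_sum X Y 33 hY2 hY3 33 0 PySem.Set.empty rfl (by intro v hv; cases hv)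
  have hB := pvBLoop_sum X Y (if X > 1 then X else 1) rfl 33 hY2 hY3 33 0 rfl
  norm_num at hA hB
  exact hA.trans ((Finset.sum_comm).trans hB.symm)
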